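-- pv_equiv track=rewrite | github.com/Saidbey/ABC-AUTO | apps/shared/utils/translation.py | from_en_to_ru
-- ===== SOURCE A (Python) =====
-- def from_en_to_ru(word: str):
--     if not word:
--         return ''
--     symbols = (u'abdefghijklmnopqrstuvxyzwcABDEFGHIJKLMNOPQRSTUVXYZC',
--                u'абдефгхижклмнопкрстувхйзвкАБДЕФГХИЖКЛМНОПКРСТУВХЙЗК')
--     characters = {ord(a): ord(b) for a, b in zip(*symbols)}
--     return word.replace('sh', 'ш').replace('ch', 'ч').replace('g\'', 'г'). \
--         replace('Sh', 'Ш').replace('Ch', 'Ч').replace('G\'', 'Г').translate(characters)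
-- ===== SOURCE B (Python) =====
-- _EN = u'abdefghijklmnopqrstuvxyzwcABDEFGHIJKLMNOPQRSTUVXYZC'
-- _RU = u'абдефгхижклмнопкрстувхйзвкАБДЕФГХИЖКЛМНОПКРСТУВХЙЗК'
-- _CHAR_MAP = {ord(a): ord(b) for a, b in zip(_EN, _RU)}
-- _DIGRAPHS = {('s', 'h'): u'ш', ('c', 'h'): u'ч', ('g', "'"): u'г',
--              ('S', 'h'): u'Ш', ('C', 'h'): u'Ч', ('G', "'"): u'Г'}
--
--
-- def from_en_to_ru(word: str):
--     out = []
--     i = 0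
--     n = len(word)
--     while i < n:
--         if i + 1 < n and (word[i], word[i + 1]) in _DIGRAPHS:
--             out.append(_DIGRAPHS[(word[i], word[i + 1])])
--             i += 2
--         else:
--             m = _CHAR_MAP.get(ord(word[i]))
--             out.append(chr(m) if m is not None else word[i])
--             i += 1
--     return ''.join(out)
-- ===== Notes on version B (the rewrite author's own statement) =====
-- stated objective: alternative
-- what changed: A makes six sequential global str.replace passes and then a str.translate pass; B makes a single left-to-right indexed scan that consumes a digraph (looked up by its character pair) or one translated character at a time.
import Mathlib
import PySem

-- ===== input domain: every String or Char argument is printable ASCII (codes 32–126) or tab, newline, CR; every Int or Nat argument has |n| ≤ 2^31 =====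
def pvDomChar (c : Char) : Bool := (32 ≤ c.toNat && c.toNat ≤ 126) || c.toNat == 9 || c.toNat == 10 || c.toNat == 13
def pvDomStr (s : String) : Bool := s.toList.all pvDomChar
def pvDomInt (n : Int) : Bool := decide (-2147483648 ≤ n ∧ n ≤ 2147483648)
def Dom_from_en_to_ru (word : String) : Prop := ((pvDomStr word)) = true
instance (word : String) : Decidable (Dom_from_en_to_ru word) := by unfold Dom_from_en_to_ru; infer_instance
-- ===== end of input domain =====

set_option maxRecDepth 8192
set_option maxHeartbeats 1000000


-- B replaces A's six sequential global .replace passes + .translate by ONE left-to-right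
-- indexed scan (digraph lookup, else per-char map); same return value, alternative algorithm.

-- shared data: both Pythons build the identical ord→ord table from the same two strings
-- (A inline in the function, B as a module-level constant)
def pvCharMap : PySem.Dict Int Int :=
  PySem.Dict.ofList
    ((("abdefghijklmnopqrstuvxyzwcABDEFGHIJKLMNOPQRSTUVXYZC".toList).zip
      ("абдефгхижклмнопкрстувхйзвкАБДЕФГХИЖКЛМНОПКРСТУВХЙЗК".toList)).map
      (fun ab => ((ab.1.toNat : Int), (ab.2.toNat : Int))))

-- str.translate / chr have no PySem primitive; ported by hand: each code point is looked
-- up in the dict by its ord, chr n = Char.ofNat (every value of the table is a valid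
-- scalar code point), a missing key leaves the character unchanged — exact.
def pvTr (c : Char) : Char :=
  match pvCharMap.get? (c.toNat : Int) with
  | some n => Char.ofNat n.toNat
  | none => c

-- ===== PORT A =====
def from_en_to_ru (word : String) : String :=
  if word = "" then ""
  else
    let r1 := PySem.Str.replace word "sh" "ш"
    let r2 := PySem.Str.replace r1 "ch" "ч"
    let r3 := PySem.Str.replace r2 "g'" "г"
    let r4 := PySem.Str.replace r3 "Sh" "Ш"
    let r5 := PySem.Str.replace r4 "Ch" "Ч"
    let r6 := PySem.Str.replace r5 "G'" "Г"
    String.ofList (r6.toList.map pvTr)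

-- ===== PORT B =====
-- the dict literal _DIGRAPHS, keyed by the pair of characters
def pvDigraphs : PySem.Dict (Char × Char) String :=
  ((((((PySem.Dict.empty.insert ('s', 'h') "ш").insert ('c', 'h') "ч").insert
      ('g', '\'') "г").insert ('S', 'h') "Ш").insert ('C', 'h') "Ч").insert ('G', '\'') "Г")

-- B's while-loop over the index i, as recursion on the remaining characters
def pvScan : List Char → List Char
  | [] => []
  | [c] => [pvTr c]
  | c :: d :: t =>
    match pvDigraphs.get? (c, d) with
    | some r => r.toList ++ pvScan t
    | none => pvTr c :: pvScan (d :: t)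

def from_en_to_ru_alt (word : String) : String :=
  String.ofList (pvScan word.toList)

-- ===== PRECONDITION & SPEC =====
def Spec_from_en_to_ru (word : String) (out : String) : Prop := out = from_en_to_ru_alt word
instance (word : String) (out : String) : Decidable (Spec_from_en_to_ru word out) := by unfold Spec_from_en_to_ru; infer_instance

-- ===== CLAIM (what is proved, stated in full; the proofs are below) =====
def Claim_equal_from_en_to_ru : Prop := ∀ (word : String), Dom_from_en_to_ru word → Spec_from_en_to_ru word (from_en_to_ru word)

-- ===== LEMMAS AND PROOFS =====

-- a clean recursive characterisation of Python's s.replace(old, new) for a 2-char old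
def rep2 (a b : Char) (nw : List Char) : List Char → List Char
  | [] => []
  | [c] => [c]
  | c :: d :: t => if c = a ∧ d = b then nw ++ rep2 a b nw t else c :: rep2 a b nw (d :: t)

theorem go_eq (a b : Char) (nw : List Char) :
    ∀ (fuel : Nat) (l acc : List Char), l.length ≤ fuel →
      PySem.Chars.replace.go [a, b] nw fuel l acc = acc.reverse ++ rep2 a b nw l := by
  intro fuel
  induction fuel with
  | zero =>
    intro l acc h
    have : l = [] := List.eq_nil_of_length_eq_zero (Nat.le_zero.mp h)
    subst this
    simp [PySem.Chars.replace.go, rep2]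
  | succ n ih =>
    intro l acc h
    match l with
    | [] => simp [PySem.Chars.replace.go, rep2]
    | [c] =>
      rw [PySem.Chars.replace.go]
      have hpre : List.isPrefixOf [a, b] [c] = false := by simp [List.isPrefixOf]
      simp only [hpre, Bool.false_eq_true, if_false]
      rw [ih [] (c :: acc) (by simp)]
      simp [rep2]
    | c :: d :: t =>
      rw [PySem.Chars.replace.go]
      by_cases hp : c = a ∧ d = b
      · obtain ⟨rfl, rfl⟩ := hp
        have hpre : List.isPrefixOf [c, d] (c :: d :: t) = true := by
          simp [List.isPrefixOf]
        simp only [hpre, if_pos, List.length_cons, List.drop_succ_cons,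
          List.length_nil, Nat.zero_add, List.drop]
        rw [ih t (nw.reverse ++ acc) (by simp at h ⊢; omega)]
        simp [rep2]
      · have hpre : List.isPrefixOf [a, b] (c :: d :: t) = false := by
          simp [List.isPrefixOf]
          intro h1 h2; exact hp ⟨h1.symm, h2.symm⟩
        simp only [hpre, Bool.false_eq_true, if_false]
        rw [ih (d :: t) (c :: acc) (by simp at h ⊢; omega)]
        simp [rep2, hp]

theorem replace_eq_rep2 (a b : Char) (nw l : List Char) :
    PySem.Chars.replace l [a, b] nw = rep2 a b nw l := by
  rw [PySem.Chars.replace]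
  simp [go_eq a b nw l.length l [] (le_refl _)]

theorem rep2_single (a b : Char) (nw : List Char) (c : Char) : rep2 a b nw [c] = [c] := rfl

theorem rep2_pos (a b : Char) (nw t : List Char) :
    rep2 a b nw (a :: b :: t) = nw ++ rep2 a b nw t := by simp [rep2]

theorem rep2_cons_ne (a b : Char) (nw : List Char) (c : Char) (l : List Char) (h : c ≠ a) :
    rep2 a b nw (c :: l) = c :: rep2 a b nw l := by
  cases l <;> simp [rep2, h]

theorem rep2_cons_ne2 (a b : Char) (nw : List Char) (c d : Char) (t : List Char) (h : d ≠ b) :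
    rep2 a b nw (c :: d :: t) = c :: rep2 a b nw (d :: t) := by
  simp [rep2, h]

-- the head of a replace output is the original head or the replacement's head
theorem rep2_head (a b γ c : Char) (l : List Char) :
    ∃ e Y, rep2 a b [γ] (c :: l) = e :: Y ∧ (e = c ∨ e = γ) := by
  cases l with
  | nil => exact ⟨c, [], rfl, Or.inl rfl⟩
  | cons d t =>
    by_cases h : c = a ∧ d = b
    · obtain ⟨rfl, rfl⟩ := h
      exact ⟨γ, rep2 c d [γ] t, by rw [rep2_pos]; rfl, Or.inr rfl⟩
    · exact ⟨c, rep2 a b [γ] (d :: t), by simp [rep2, h], Or.inl rfl⟩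

-- A's whole pipeline on the character list
def chainL (l : List Char) : List Char :=
  (rep2 'G' '\'' ['Г'] (rep2 'C' 'h' ['Ч'] (rep2 'S' 'h' ['Ш'] (rep2 'g' '\'' ['г']
    (rep2 'c' 'h' ['ч'] (rep2 's' 'h' ['ш'] l)))))).map pvTr

theorem A_eq_chain (word : String) : from_en_to_ru word = String.ofList (chainL word.toList) := by
  by_cases h : word = ""
  · subst h; rfl
  · simp only [from_en_to_ru, h, if_false, chainL]
    refine congrArg String.ofList ?_
    simp only [PySem.Str.toList_replace]
    rw [show ("sh".toList) = ['s', 'h'] by decide, show ("ш".toList) = ['ш'] by decide,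
        show ("ch".toList) = ['c', 'h'] by decide, show ("ч".toList) = ['ч'] by decide,
        show ("g'".toList) = ['g', '\''] by decide, show ("г".toList) = ['г'] by decide,
        show ("Sh".toList) = ['S', 'h'] by decide, show ("Ш".toList) = ['Ш'] by decide,
        show ("Ch".toList) = ['C', 'h'] by decide, show ("Ч".toList) = ['Ч'] by decide,
        show ("G'".toList) = ['G', '\''] by decide, show ("Г".toList) = ['Г'] by decide]
    simp only [replace_eq_rep2]

-- pvTr fixes the Cyrillic replacement characters
theorem pvTr_sh : pvTr 'ш' = 'ш' := by decide
theorem pvTr_ch : pvTr 'ч' = 'ч' := by decide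
theorem pvTr_g : pvTr 'г' = 'г' := by decide
theorem pvTr_Sh : pvTr 'Ш' = 'Ш' := by decide
theorem pvTr_Ch : pvTr 'Ч' = 'Ч' := by decide
theorem pvTr_G : pvTr 'Г' = 'Г' := by decide

-- step lemmas for A's chain
theorem chain_single (c : Char) : chainL [c] = [pvTr c] := by
  simp [chainL, rep2_single]

theorem chain_sh (t : List Char) : chainL ('s' :: 'h' :: t) = 'ш' :: chainL t := by
  unfold chainL
  rw [rep2_pos, List.singleton_append,
      rep2_cons_ne _ _ _ _ _ (by decide), rep2_cons_ne _ _ _ _ _ (by decide),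
      rep2_cons_ne _ _ _ _ _ (by decide), rep2_cons_ne _ _ _ _ _ (by decide),
      rep2_cons_ne _ _ _ _ _ (by decide), List.map_cons, pvTr_sh]

theorem chain_ch (t : List Char) : chainL ('c' :: 'h' :: t) = 'ч' :: chainL t := by
  unfold chainL
  rw [rep2_cons_ne _ _ _ _ _ (by decide : ('c' : Char) ≠ 's'),
      rep2_cons_ne _ _ _ _ _ (by decide : ('h' : Char) ≠ 's'),
      rep2_pos, List.singleton_append,
      rep2_cons_ne _ _ _ _ _ (by decide), rep2_cons_ne _ _ _ _ _ (by decide),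
      rep2_cons_ne _ _ _ _ _ (by decide), rep2_cons_ne _ _ _ _ _ (by decide),
      List.map_cons, pvTr_ch]

theorem chain_g (t : List Char) : chainL ('g' :: '\'' :: t) = 'г' :: chainL t := by
  unfold chainL
  rw [rep2_cons_ne _ _ _ _ _ (by decide : ('g' : Char) ≠ 's'),
      rep2_cons_ne _ _ _ _ _ (by decide : ('\'' : Char) ≠ 's'),
      rep2_cons_ne _ _ _ _ _ (by decide : ('g' : Char) ≠ 'c'),
      rep2_cons_ne _ _ _ _ _ (by decide : ('\'' : Char) ≠ 'c'),
      rep2_pos, List.singleton_append,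
      rep2_cons_ne _ _ _ _ _ (by decide), rep2_cons_ne _ _ _ _ _ (by decide),
      rep2_cons_ne _ _ _ _ _ (by decide), List.map_cons, pvTr_g]

theorem chain_Sh (t : List Char) : chainL ('S' :: 'h' :: t) = 'Ш' :: chainL t := by
  unfold chainL
  rw [rep2_cons_ne _ _ _ _ _ (by decide : ('S' : Char) ≠ 's'),
      rep2_cons_ne _ _ _ _ _ (by decide : ('h' : Char) ≠ 's'),
      rep2_cons_ne _ _ _ _ _ (by decide : ('S' : Char) ≠ 'c'),
      rep2_cons_ne _ _ _ _ _ (by decide : ('h' : Char) ≠ 'c'),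
      rep2_cons_ne _ _ _ _ _ (by decide : ('S' : Char) ≠ 'g'),
      rep2_cons_ne _ _ _ _ _ (by decide : ('h' : Char) ≠ 'g'),
      rep2_pos, List.singleton_append,
      rep2_cons_ne _ _ _ _ _ (by decide), rep2_cons_ne _ _ _ _ _ (by decide),
      List.map_cons, pvTr_Sh]

theorem chain_Ch (t : List Char) : chainL ('C' :: 'h' :: t) = 'Ч' :: chainL t := by
  unfold chainL
  rw [rep2_cons_ne _ _ _ _ _ (by decide : ('C' : Char) ≠ 's'),
      rep2_cons_ne _ _ _ _ _ (by decide : ('h' : Char) ≠ 's'),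
      rep2_cons_ne _ _ _ _ _ (by decide : ('C' : Char) ≠ 'c'),
      rep2_cons_ne _ _ _ _ _ (by decide : ('h' : Char) ≠ 'c'),
      rep2_cons_ne _ _ _ _ _ (by decide : ('C' : Char) ≠ 'g'),
      rep2_cons_ne _ _ _ _ _ (by decide : ('h' : Char) ≠ 'g'),
      rep2_cons_ne _ _ _ _ _ (by decide : ('C' : Char) ≠ 'S'),
      rep2_cons_ne _ _ _ _ _ (by decide : ('h' : Char) ≠ 'S'),
      rep2_pos, List.singleton_append,
      rep2_cons_ne _ _ _ _ _ (by decide), List.map_cons, pvTr_Ch]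

theorem chain_G (t : List Char) : chainL ('G' :: '\'' :: t) = 'Г' :: chainL t := by
  unfold chainL
  rw [rep2_cons_ne _ _ _ _ _ (by decide : ('G' : Char) ≠ 's'),
      rep2_cons_ne _ _ _ _ _ (by decide : ('\'' : Char) ≠ 's'),
      rep2_cons_ne _ _ _ _ _ (by decide : ('G' : Char) ≠ 'c'),
      rep2_cons_ne _ _ _ _ _ (by decide : ('\'' : Char) ≠ 'c'),
      rep2_cons_ne _ _ _ _ _ (by decide : ('G' : Char) ≠ 'g'),
      rep2_cons_ne _ _ _ _ _ (by decide : ('\'' : Char) ≠ 'g'),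
      rep2_cons_ne _ _ _ _ _ (by decide : ('G' : Char) ≠ 'S'),
      rep2_cons_ne _ _ _ _ _ (by decide : ('\'' : Char) ≠ 'S'),
      rep2_cons_ne _ _ _ _ _ (by decide : ('G' : Char) ≠ 'C'),
      rep2_cons_ne _ _ _ _ _ (by decide : ('\'' : Char) ≠ 'C'),
      rep2_pos, List.singleton_append, List.map_cons, pvTr_G]

theorem chain_nodigraph (c d : Char) (t : List Char)
    (h1 : ¬(c = 's' ∧ d = 'h')) (h2 : ¬(c = 'c' ∧ d = 'h')) (h3 : ¬(c = 'g' ∧ d = '\''))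
    (h4 : ¬(c = 'S' ∧ d = 'h')) (h5 : ¬(c = 'C' ∧ d = 'h')) (h6 : ¬(c = 'G' ∧ d = '\'')) :
    chainL (c :: d :: t) = pvTr c :: chainL (d :: t) := by
  unfold chainL
  by_cases hs : c = 's'
  · subst hs
    have hd : d ≠ 'h' := fun h => h1 ⟨rfl, h⟩
    rw [rep2_cons_ne2 _ _ _ _ _ _ hd,
        rep2_cons_ne _ _ _ _ _ (by decide), rep2_cons_ne _ _ _ _ _ (by decide),
        rep2_cons_ne _ _ _ _ _ (by decide), rep2_cons_ne _ _ _ _ _ (by decide),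
        rep2_cons_ne _ _ _ _ _ (by decide), List.map_cons]
  by_cases hc : c = 'c'
  · subst hc
    have hd : d ≠ 'h' := fun h => h2 ⟨rfl, h⟩
    rw [rep2_cons_ne _ _ _ _ _ (by decide : ('c' : Char) ≠ 's')]
    obtain ⟨e, Y, hE, he⟩ := rep2_head 's' 'h' 'ш' d t
    have hne : e ≠ 'h' := by
      rcases he with rfl | rfl
      · exact hd
      · decide
    rw [hE, rep2_cons_ne2 _ _ _ _ _ _ hne, ← hE,
        rep2_cons_ne _ _ _ _ _ (by decide), rep2_cons_ne _ _ _ _ _ (by decide),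
        rep2_cons_ne _ _ _ _ _ (by decide), rep2_cons_ne _ _ _ _ _ (by decide),
        List.map_cons]
  by_cases hg : c = 'g'
  · subst hg
    have hd : d ≠ '\'' := fun h => h3 ⟨rfl, h⟩
    rw [rep2_cons_ne _ _ _ _ _ (by decide : ('g' : Char) ≠ 's'),
        rep2_cons_ne _ _ _ _ _ (by decide : ('g' : Char) ≠ 'c')]
    obtain ⟨e1, Y1, hE1, he1⟩ := rep2_head 's' 'h' 'ш' d t
    rw [hE1]
    obtain ⟨e2, Y2, hE2, he2⟩ := rep2_head 'c' 'h' 'ч' e1 Y1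
    have hne : e2 ≠ '\'' := by
      rcases he2 with rfl | rfl
      · rcases he1 with rfl | rfl
        · exact hd
        · decide
      · decide
    rw [hE2, rep2_cons_ne2 _ _ _ _ _ _ hne, ← hE2, ← hE1,
        rep2_cons_ne _ _ _ _ _ (by decide), rep2_cons_ne _ _ _ _ _ (by decide),
        rep2_cons_ne _ _ _ _ _ (by decide), List.map_cons]
  by_cases hS : c = 'S'
  · subst hS
    have hd : d ≠ 'h' := fun h => h4 ⟨rfl, h⟩
    rw [rep2_cons_ne _ _ _ _ _ (by decide : ('S' : Char) ≠ 's'),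
        rep2_cons_ne _ _ _ _ _ (by decide : ('S' : Char) ≠ 'c'),
        rep2_cons_ne _ _ _ _ _ (by decide : ('S' : Char) ≠ 'g')]
    obtain ⟨e1, Y1, hE1, he1⟩ := rep2_head 's' 'h' 'ш' d t
    rw [hE1]
    obtain ⟨e2, Y2, hE2, he2⟩ := rep2_head 'c' 'h' 'ч' e1 Y1
    rw [hE2]
    obtain ⟨e3, Y3, hE3, he3⟩ := rep2_head 'g' '\'' 'г' e2 Y2
    have hne : e3 ≠ 'h' := by
      rcases he3 with rfl | rfl
      · rcases he2 with rfl | rfl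
        · rcases he1 with rfl | rfl
          · exact hd
          · decide
        · decide
      · decide
    rw [hE3, rep2_cons_ne2 _ _ _ _ _ _ hne, ← hE3, ← hE2, ← hE1,
        rep2_cons_ne _ _ _ _ _ (by decide), rep2_cons_ne _ _ _ _ _ (by decide),
        List.map_cons]
  by_cases hC : c = 'C'
  · subst hC
    have hd : d ≠ 'h' := fun h => h5 ⟨rfl, h⟩
    rw [rep2_cons_ne _ _ _ _ _ (by decide : ('C' : Char) ≠ 's'),
        rep2_cons_ne _ _ _ _ _ (by decide : ('C' : Char) ≠ 'c'),
        rep2_cons_ne _ _ _ _ _ (by decide : ('C' : Char) ≠ 'g'),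
        rep2_cons_ne _ _ _ _ _ (by decide : ('C' : Char) ≠ 'S')]
    obtain ⟨e1, Y1, hE1, he1⟩ := rep2_head 's' 'h' 'ш' d t
    rw [hE1]
    obtain ⟨e2, Y2, hE2, he2⟩ := rep2_head 'c' 'h' 'ч' e1 Y1
    rw [hE2]
    obtain ⟨e3, Y3, hE3, he3⟩ := rep2_head 'g' '\'' 'г' e2 Y2
    rw [hE3]
    obtain ⟨e4, Y4, hE4, he4⟩ := rep2_head 'S' 'h' 'Ш' e3 Y3
    have hne : e4 ≠ 'h' := by
      rcases he4 with rfl | rfl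
      · rcases he3 with rfl | rfl
        · rcases he2 with rfl | rfl
          · rcases he1 with rfl | rfl
            · exact hd
            · decide
          · decide
        · decide
      · decide
    rw [hE4, rep2_cons_ne2 _ _ _ _ _ _ hne, ← hE4, ← hE3, ← hE2, ← hE1,
        rep2_cons_ne _ _ _ _ _ (by decide), List.map_cons]
  by_cases hG : c = 'G'
  · subst hG
    have hd : d ≠ '\'' := fun h => h6 ⟨rfl, h⟩
    rw [rep2_cons_ne _ _ _ _ _ (by decide : ('G' : Char) ≠ 's'),
        rep2_cons_ne _ _ _ _ _ (by decide : ('G' : Char) ≠ 'c'),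
        rep2_cons_ne _ _ _ _ _ (by decide : ('G' : Char) ≠ 'g'),
        rep2_cons_ne _ _ _ _ _ (by decide : ('G' : Char) ≠ 'S'),
        rep2_cons_ne _ _ _ _ _ (by decide : ('G' : Char) ≠ 'C')]
    obtain ⟨e1, Y1, hE1, he1⟩ := rep2_head 's' 'h' 'ш' d t
    rw [hE1]
    obtain ⟨e2, Y2, hE2, he2⟩ := rep2_head 'c' 'h' 'ч' e1 Y1
    rw [hE2]
    obtain ⟨e3, Y3, hE3, he3⟩ := rep2_head 'g' '\'' 'г' e2 Y2
    rw [hE3]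
    obtain ⟨e4, Y4, hE4, he4⟩ := rep2_head 'S' 'h' 'Ш' e3 Y3
    rw [hE4]
    obtain ⟨e5, Y5, hE5, he5⟩ := rep2_head 'C' 'h' 'Ч' e4 Y4
    have hne : e5 ≠ '\'' := by
      rcases he5 with rfl | rfl
      · rcases he4 with rfl | rfl
        · rcases he3 with rfl | rfl
          · rcases he2 with rfl | rfl
            · rcases he1 with rfl | rfl
              · exact hd
              · decide
            · decide
          · decide
        · decide
      · decide
    rw [hE5, rep2_cons_ne2 _ _ _ _ _ _ hne, ← hE5, ← hE4, ← hE3, ← hE2, ← hE1,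
        List.map_cons]
  · rw [rep2_cons_ne _ _ _ _ _ hs, rep2_cons_ne _ _ _ _ _ hc,
        rep2_cons_ne _ _ _ _ _ hg, rep2_cons_ne _ _ _ _ _ hS,
        rep2_cons_ne _ _ _ _ _ hC, rep2_cons_ne _ _ _ _ _ hG, List.map_cons]

-- B's scan: step lemmas
theorem digraphs_none (c d : Char)
    (h1 : ¬(c = 's' ∧ d = 'h')) (h2 : ¬(c = 'c' ∧ d = 'h')) (h3 : ¬(c = 'g' ∧ d = '\''))
    (h4 : ¬(c = 'S' ∧ d = 'h')) (h5 : ¬(c = 'C' ∧ d = 'h')) (h6 : ¬(c = 'G' ∧ d = '\'')) :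
    pvDigraphs.get? (c, d) = none := by
  unfold pvDigraphs
  rw [PySem.Dict.get?_insert, PySem.Dict.get?_insert, PySem.Dict.get?_insert,
      PySem.Dict.get?_insert, PySem.Dict.get?_insert, PySem.Dict.get?_insert]
  simp only [Prod.mk.injEq, PySem.Dict.get?_empty]
  rw [if_neg h6, if_neg h5, if_neg h4, if_neg h3, if_neg h2, if_neg h1]

theorem scan_none (c d : Char) (t : List Char) (h : pvDigraphs.get? (c, d) = none) :
    pvScan (c :: d :: t) = pvTr c :: pvScan (d :: t) := by
  simp [pvScan, h]

theorem scan_sh (t : List Char) : pvScan ('s' :: 'h' :: t) = 'ш' :: pvScan t := by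
  have h : pvDigraphs.get? ('s', 'h') = some "ш" := by
    unfold pvDigraphs; simp [PySem.Dict.get?_insert]
  simp [pvScan, h]
theorem scan_ch (t : List Char) : pvScan ('c' :: 'h' :: t) = 'ч' :: pvScan t := by
  have h : pvDigraphs.get? ('c', 'h') = some "ч" := by
    unfold pvDigraphs; simp [PySem.Dict.get?_insert]
  simp [pvScan, h]
theorem scan_g (t : List Char) : pvScan ('g' :: '\'' :: t) = 'г' :: pvScan t := by
  have h : pvDigraphs.get? ('g', '\'') = some "г" := by
    unfold pvDigraphs; simp [PySem.Dict.get?_insert]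
  simp [pvScan, h]
theorem scan_Sh (t : List Char) : pvScan ('S' :: 'h' :: t) = 'Ш' :: pvScan t := by
  have h : pvDigraphs.get? ('S', 'h') = some "Ш" := by
    unfold pvDigraphs; simp [PySem.Dict.get?_insert]
  simp [pvScan, h]
theorem scan_Ch (t : List Char) : pvScan ('C' :: 'h' :: t) = 'Ч' :: pvScan t := by
  have h : pvDigraphs.get? ('C', 'h') = some "Ч" := by
    unfold pvDigraphs; simp [PySem.Dict.get?_insert]
  simp [pvScan, h]
theorem scan_G (t : List Char) : pvScan ('G' :: '\'' :: t) = 'Г' :: pvScan t := by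
  have h : pvDigraphs.get? ('G', '\'') = some "Г" := by
    unfold pvDigraphs; simp
  simp [pvScan, h]

theorem chain_eq_scan : ∀ l : List Char, chainL l = pvScan l
  | [] => rfl
  | [c] => by rw [chain_single]; rfl
  | c :: d :: t => by
    by_cases h1 : c = 's' ∧ d = 'h'
    · obtain ⟨rfl, rfl⟩ := h1; rw [chain_sh, scan_sh, chain_eq_scan t]
    by_cases h2 : c = 'c' ∧ d = 'h'
    · obtain ⟨rfl, rfl⟩ := h2; rw [chain_ch, scan_ch, chain_eq_scan t]
    by_cases h3 : c = 'g' ∧ d = '\''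
    · obtain ⟨rfl, rfl⟩ := h3; rw [chain_g, scan_g, chain_eq_scan t]
    by_cases h4 : c = 'S' ∧ d = 'h'
    · obtain ⟨rfl, rfl⟩ := h4; rw [chain_Sh, scan_Sh, chain_eq_scan t]
    by_cases h5 : c = 'C' ∧ d = 'h'
    · obtain ⟨rfl, rfl⟩ := h5; rw [chain_Ch, scan_Ch, chain_eq_scan t]
    by_cases h6 : c = 'G' ∧ d = '\''
    · obtain ⟨rfl, rfl⟩ := h6; rw [chain_G, scan_G, chain_eq_scan t]
    · rw [chain_nodigraph c d t h1 h2 h3 h4 h5 h6,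
          scan_none c d t (digraphs_none c d h1 h2 h3 h4 h5 h6),
          chain_eq_scan (d :: t)]
  termination_by l => l.length
  decreasing_by all_goals (simp; try omega)

-- ===== VERDICT (by name: the statement is the Claim_ definition above) =====
theorem from_en_to_ru_spec : Claim_equal_from_en_to_ru := by
  intro word _
  unfold Spec_from_en_to_ru from_en_to_ru_alt
  rw [A_eq_chain, chain_eq_scan]
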